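-- pv_equiv track=rewrite | github.com/clay-good/proxilion-sdk | proxilion/security/scope_enforcer.py | _infer_actions
-- ===== SOURCE A (Python) =====
-- def _infer_actions(tool_name: str) -> set[str]:
--     """Infer actions from tool name prefix."""
--     tool_lower = tool_name.lower()
--     actions = set()
--
--     read_prefixes = ("get_", "read_", "list_", "search_", "query_", "fetch_", "find_")
--     if any(tool_lower.startswith(p) for p in read_prefixes):
--         actions.add("read")
--     if any(tool_lower.startswith(p) for p in ("create_", "write_", "add_", "insert_", "save_")):
--         actions.add("write")
--         actions.add("create")
--     if any(tool_lower.startswith(p) for p in ("update_", "modify_", "set_", "put_")):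
--         actions.add("write")
--         actions.add("modify")
--     delete_prefixes = ("delete_", "remove_", "drop_", "destroy_", "purge_")
--     if any(tool_lower.startswith(p) for p in delete_prefixes):
--         actions.add("delete")
--     if any(tool_lower.startswith(p) for p in ("execute_", "run_", "kill_", "terminate_")):
--         actions.add("execute")
--
--     return actions or {"execute"}  # Default to execute if unknown
-- ===== SOURCE B (Python) =====
-- _ACTION_TABLE = {
--     "get": ["read"], "read": ["read"], "list": ["read"], "search": ["read"],
--     "query": ["read"], "fetch": ["read"], "find": ["read"],
--     "create": ["write", "create"], "write": ["write", "create"], "add": ["write", "create"],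
--     "insert": ["write", "create"], "save": ["write", "create"],
--     "update": ["write", "modify"], "modify": ["write", "modify"],
--     "set": ["write", "modify"], "put": ["write", "modify"],
--     "delete": ["delete"], "remove": ["delete"], "drop": ["delete"],
--     "destroy": ["delete"], "purge": ["delete"],
--     "execute": ["execute"], "run": ["execute"], "kill": ["execute"], "terminate": ["execute"],
-- }
--
--
-- def _infer_actions(tool_name: str) -> set[str]:
--     """Infer actions from tool name prefix via one table lookup on the leading token."""
--     head, sep, _rest = tool_name.lower().partition("_")
--     if sep:
--         acts = _ACTION_TABLE.get(head)
--         if acts is not None: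
--             return set(acts)
--     return {"execute"}
-- ===== Notes on version B (the rewrite author's own statement) =====
-- stated objective: idiomatic
-- what changed: Replaces five any()-over-prefix-tuple scans (25 startswith calls) with one partition('_') of the leading token and a single dict lookup in a prefix->actions table.
import Mathlib
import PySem

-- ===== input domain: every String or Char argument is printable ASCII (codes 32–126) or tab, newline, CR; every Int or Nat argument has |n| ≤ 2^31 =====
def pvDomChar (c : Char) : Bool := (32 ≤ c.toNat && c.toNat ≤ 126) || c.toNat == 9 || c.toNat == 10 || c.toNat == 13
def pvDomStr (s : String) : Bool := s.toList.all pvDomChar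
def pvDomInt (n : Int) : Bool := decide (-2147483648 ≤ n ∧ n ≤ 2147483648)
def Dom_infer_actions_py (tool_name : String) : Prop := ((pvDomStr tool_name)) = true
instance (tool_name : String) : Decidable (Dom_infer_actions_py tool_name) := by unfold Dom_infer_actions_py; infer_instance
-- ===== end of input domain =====

-- B replaces A's five repeated prefix scans by one partition of the leading '_'-token and a single table lookup (idiomatic; same result).

-- ===== PORT A =====
def infer_actions_py (tool_name : String) : List String :=
  let tool_lower := PySem.Str.lower tool_name
  let actions : List String := PySem.Set.empty
  let read_prefixes : List String := ["get_", "read_", "list_", "search_", "query_", "fetch_", "find_"]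
  let actions := if read_prefixes.any (fun p => PySem.Str.startswith tool_lower p) then PySem.Set.add actions "read" else actions
  let actions := if (["create_", "write_", "add_", "insert_", "save_"] : List String).any (fun p => PySem.Str.startswith tool_lower p) then
      PySem.Set.add (PySem.Set.add actions "write") "create" else actions
  let actions := if (["update_", "modify_", "set_", "put_"] : List String).any (fun p => PySem.Str.startswith tool_lower p) then
      PySem.Set.add (PySem.Set.add actions "write") "modify" else actions
  let delete_prefixes : List String := ["delete_", "remove_", "drop_", "destroy_", "purge_"]
  let actions := if delete_prefixes.any (fun p => PySem.Str.startswith tool_lower p) then PySem.Set.add actions "delete" else actions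
  let actions := if (["execute_", "run_", "kill_", "terminate_"] : List String).any (fun p => PySem.Str.startswith tool_lower p) then
      PySem.Set.add actions "execute" else actions
  if actions.isEmpty then ["execute"] else actions

-- ===== PORT B =====
def pvActionTable : PySem.Dict String (List String) :=
  ⟨[("get", ["read"]), ("read", ["read"]), ("list", ["read"]), ("search", ["read"]),
   ("query", ["read"]), ("fetch", ["read"]), ("find", ["read"]),
   ("create", ["write", "create"]), ("write", ["write", "create"]), ("add", ["write", "create"]),
   ("insert", ["write", "create"]), ("save", ["write", "create"]),
   ("update", ["write", "modify"]), ("modify", ["write", "modify"]),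
   ("set", ["write", "modify"]), ("put", ["write", "modify"]),
   ("delete", ["delete"]), ("remove", ["delete"]), ("drop", ["delete"]),
   ("destroy", ["delete"]), ("purge", ["delete"]),
   ("execute", ["execute"]), ("run", ["execute"]), ("kill", ["execute"]), ("terminate", ["execute"])]⟩

def infer_actions_py_alt (tool_name : String) : List String :=
  let tl := PySem.Str.lower tool_name
  -- str.partition('_') ported by hand (exact): head = chars before the first '_'; sep present ↔ '_' occurs
  let head := String.ofList (tl.toList.takeWhile (fun c => c != '_'))
  let sep := tl.toList.contains '_'
  if sep then
    match PySem.Dict.get? pvActionTable head with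
    | some acts => PySem.Set.ofList acts
    | none => ["execute"]
  else ["execute"]

-- ===== PRECONDITION & SPEC =====
def Spec_infer_actions_py (tool_name : String) (out : List String) : Prop := out = infer_actions_py_alt tool_name
instance (tool_name : String) (out : List String) : Decidable (Spec_infer_actions_py tool_name out) := by unfold Spec_infer_actions_py; infer_instance

-- ===== CLAIM (what is proved, stated in full; the proofs are below) =====
def Claim_equal_infer_actions_py : Prop := ∀ (tool_name : String), Dom_infer_actions_py tool_name → Spec_infer_actions_py tool_name (infer_actions_py tool_name)

-- ===== LEMMAS AND PROOFS =====

-- a word-plus-underscore prefix matches iff the word is exactly the part before the first '_' and a '_' occurs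
theorem pv_prefix_word_underscore (w : List Char) (hw : '_' ∉ w) (cs : List Char) :
    ((w ++ ['_']) <+: cs) ↔ (cs.takeWhile (fun c => c != '_') = w ∧ '_' ∈ cs) := by
  induction w generalizing cs with
  | nil =>
    cases cs with
    | nil => simp
    | cons c t =>
      by_cases hc : c = '_'
      · subst hc; simp
      · simp [hc, List.cons_prefix_cons]
        intro h; exact absurd h.symm hc
  | cons a w' ih =>
    have ha : a ≠ '_' := fun h => hw (h ▸ List.mem_cons_self)
    have hw' : '_' ∉ w' := fun h => hw (List.mem_cons_of_mem _ h)
    cases cs with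
    | nil => simp
    | cons c t =>
      by_cases hc : c = a
      · subst hc
        simp [List.cons_prefix_cons, ha, ih hw' t, Ne.symm ha]
      · constructor
        · rintro h
          rw [List.cons_append, List.cons_prefix_cons] at h
          exact absurd h.1.symm hc
        · rintro ⟨h, _⟩
          by_cases hcu : c = '_'
          · exact absurd ((List.takeWhile_cons_of_neg (by simp [hcu])).symm.trans h) (by simp)
          · rw [List.takeWhile_cons_of_pos (by simp [hcu])] at h
            exact absurd (List.head_eq_of_cons_eq h.symm) (fun he => hc he.symm)

theorem pv_swb (cs : List Char) (w : String) (hw : '_' ∉ w.toList) :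
    PySem.Chars.startswith cs (w.toList ++ ['_']) =
      ((String.ofList (cs.takeWhile (fun c => c != '_')) == w) && cs.contains '_') := by
  rw [Bool.eq_iff_iff]
  rw [PySem.Chars.startswith_iff, pv_prefix_word_underscore _ hw]
  simp [String.ext_iff]

theorem infer_actions_py_core (cs : List Char) :
    (let actions : List String := PySem.Set.empty
     let actions := if (["get_", "read_", "list_", "search_", "query_", "fetch_", "find_"] : List String).any (fun p => PySem.Chars.startswith cs p.toList) then PySem.Set.add actions "read" else actions
     let actions := if (["create_", "write_", "add_", "insert_", "save_"] : List String).any (fun p => PySem.Chars.startswith cs p.toList) then PySem.Set.add (PySem.Set.add actions "write") "create" else actions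
     let actions := if (["update_", "modify_", "set_", "put_"] : List String).any (fun p => PySem.Chars.startswith cs p.toList) then PySem.Set.add (PySem.Set.add actions "write") "modify" else actions
     let actions := if (["delete_", "remove_", "drop_", "destroy_", "purge_"] : List String).any (fun p => PySem.Chars.startswith cs p.toList) then PySem.Set.add actions "delete" else actions
     let actions := if (["execute_", "run_", "kill_", "terminate_"] : List String).any (fun p => PySem.Chars.startswith cs p.toList) then PySem.Set.add actions "execute" else actions
     if actions.isEmpty then ["execute"] else actions) =
    (let head := String.ofList (cs.takeWhile (fun c => c != '_'))
     let sep := cs.contains '_'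
     if sep then
       match PySem.Dict.get? pvActionTable head with
       | some acts => PySem.Set.ofList acts
       | none => ["execute"]
     else ["execute"]) := by
  have e1 : ∀ cs : List Char, PySem.Chars.startswith cs ("get_".toList) = ((String.ofList (cs.takeWhile (fun c => c != '_')) == "get") && cs.contains '_') := fun cs => pv_swb cs "get" (by decide)
  have e2 : ∀ cs : List Char, PySem.Chars.startswith cs ("read_".toList) = ((String.ofList (cs.takeWhile (fun c => c != '_')) == "read") && cs.contains '_') := fun cs => pv_swb cs "read" (by decide)
  have e3 : ∀ cs : List Char, PySem.Chars.startswith cs ("list_".toList) = ((String.ofList (cs.takeWhile (fun c => c != '_')) == "list") && cs.contains '_') := fun cs => pv_swb cs "list" (by decide)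
  have e4 : ∀ cs : List Char, PySem.Chars.startswith cs ("search_".toList) = ((String.ofList (cs.takeWhile (fun c => c != '_')) == "search") && cs.contains '_') := fun cs => pv_swb cs "search" (by decide)
  have e5 : ∀ cs : List Char, PySem.Chars.startswith cs ("query_".toList) = ((String.ofList (cs.takeWhile (fun c => c != '_')) == "query") && cs.contains '_') := fun cs => pv_swb cs "query" (by decide)
  have e6 : ∀ cs : List Char, PySem.Chars.startswith cs ("fetch_".toList) = ((String.ofList (cs.takeWhile (fun c => c != '_')) == "fetch") && cs.contains '_') := fun cs => pv_swb cs "fetch" (by decide)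
  have e7 : ∀ cs : List Char, PySem.Chars.startswith cs ("find_".toList) = ((String.ofList (cs.takeWhile (fun c => c != '_')) == "find") && cs.contains '_') := fun cs => pv_swb cs "find" (by decide)
  have e8 : ∀ cs : List Char, PySem.Chars.startswith cs ("create_".toList) = ((String.ofList (cs.takeWhile (fun c => c != '_')) == "create") && cs.contains '_') := fun cs => pv_swb cs "create" (by decide)
  have e9 : ∀ cs : List Char, PySem.Chars.startswith cs ("write_".toList) = ((String.ofList (cs.takeWhile (fun c => c != '_')) == "write") && cs.contains '_') := fun cs => pv_swb cs "write" (by decide)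
  have e10 : ∀ cs : List Char, PySem.Chars.startswith cs ("add_".toList) = ((String.ofList (cs.takeWhile (fun c => c != '_')) == "add") && cs.contains '_') := fun cs => pv_swb cs "add" (by decide)
  have e11 : ∀ cs : List Char, PySem.Chars.startswith cs ("insert_".toList) = ((String.ofList (cs.takeWhile (fun c => c != '_')) == "insert") && cs.contains '_') := fun cs => pv_swb cs "insert" (by decide)
  have e12 : ∀ cs : List Char, PySem.Chars.startswith cs ("save_".toList) = ((String.ofList (cs.takeWhile (fun c => c != '_')) == "save") && cs.contains '_') := fun cs => pv_swb cs "save" (by decide)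
  have e13 : ∀ cs : List Char, PySem.Chars.startswith cs ("update_".toList) = ((String.ofList (cs.takeWhile (fun c => c != '_')) == "update") && cs.contains '_') := fun cs => pv_swb cs "update" (by decide)
  have e14 : ∀ cs : List Char, PySem.Chars.startswith cs ("modify_".toList) = ((String.ofList (cs.takeWhile (fun c => c != '_')) == "modify") && cs.contains '_') := fun cs => pv_swb cs "modify" (by decide)
  have e15 : ∀ cs : List Char, PySem.Chars.startswith cs ("set_".toList) = ((String.ofList (cs.takeWhile (fun c => c != '_')) == "set") && cs.contains '_') := fun cs => pv_swb cs "set" (by decide)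
  have e16 : ∀ cs : List Char, PySem.Chars.startswith cs ("put_".toList) = ((String.ofList (cs.takeWhile (fun c => c != '_')) == "put") && cs.contains '_') := fun cs => pv_swb cs "put" (by decide)
  have e17 : ∀ cs : List Char, PySem.Chars.startswith cs ("delete_".toList) = ((String.ofList (cs.takeWhile (fun c => c != '_')) == "delete") && cs.contains '_') := fun cs => pv_swb cs "delete" (by decide)
  have e18 : ∀ cs : List Char, PySem.Chars.startswith cs ("remove_".toList) = ((String.ofList (cs.takeWhile (fun c => c != '_')) == "remove") && cs.contains '_') := fun cs => pv_swb cs "remove" (by decide)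
  have e19 : ∀ cs : List Char, PySem.Chars.startswith cs ("drop_".toList) = ((String.ofList (cs.takeWhile (fun c => c != '_')) == "drop") && cs.contains '_') := fun cs => pv_swb cs "drop" (by decide)
  have e20 : ∀ cs : List Char, PySem.Chars.startswith cs ("destroy_".toList) = ((String.ofList (cs.takeWhile (fun c => c != '_')) == "destroy") && cs.contains '_') := fun cs => pv_swb cs "destroy" (by decide)
  have e21 : ∀ cs : List Char, PySem.Chars.startswith cs ("purge_".toList) = ((String.ofList (cs.takeWhile (fun c => c != '_')) == "purge") && cs.contains '_') := fun cs => pv_swb cs "purge" (by decide)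
  have e22 : ∀ cs : List Char, PySem.Chars.startswith cs ("execute_".toList) = ((String.ofList (cs.takeWhile (fun c => c != '_')) == "execute") && cs.contains '_') := fun cs => pv_swb cs "execute" (by decide)
  have e23 : ∀ cs : List Char, PySem.Chars.startswith cs ("run_".toList) = ((String.ofList (cs.takeWhile (fun c => c != '_')) == "run") && cs.contains '_') := fun cs => pv_swb cs "run" (by decide)
  have e24 : ∀ cs : List Char, PySem.Chars.startswith cs ("kill_".toList) = ((String.ofList (cs.takeWhile (fun c => c != '_')) == "kill") && cs.contains '_') := fun cs => pv_swb cs "kill" (by decide)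
  have e25 : ∀ cs : List Char, PySem.Chars.startswith cs ("terminate_".toList) = ((String.ofList (cs.takeWhile (fun c => c != '_')) == "terminate") && cs.contains '_') := fun cs => pv_swb cs "terminate" (by decide)
  simp only [List.any_cons, List.any_nil, e1, e2, e3, e4, e5, e6, e7, e8, e9, e10, e11, e12, e13, e14, e15, e16, e17, e18, e19, e20, e21, e22, e23, e24, e25, Bool.or_false]
  generalize String.ofList (cs.takeWhile (fun c => c != '_')) = h
  generalize cs.contains '_' = u
  cases u
  · simp
  · by_cases h1 : h = "get"
    · subst h1; decide
    by_cases h2 : h = "read"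
    · subst h2; decide
    by_cases h3 : h = "list"
    · subst h3; decide
    by_cases h4 : h = "search"
    · subst h4; decide
    by_cases h5 : h = "query"
    · subst h5; decide
    by_cases h6 : h = "fetch"
    · subst h6; decide
    by_cases h7 : h = "find"
    · subst h7; decide
    by_cases h8 : h = "create"
    · subst h8; decide
    by_cases h9 : h = "write"
    · subst h9; decide
    by_cases h10 : h = "add"
    · subst h10; decide
    by_cases h11 : h = "insert"
    · subst h11; decide
    by_cases h12 : h = "save"
    · subst h12; decide
    by_cases h13 : h = "update"
    · subst h13; decide
    by_cases h14 : h = "modify"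
    · subst h14; decide
    by_cases h15 : h = "set"
    · subst h15; decide
    by_cases h16 : h = "put"
    · subst h16; decide
    by_cases h17 : h = "delete"
    · subst h17; decide
    by_cases h18 : h = "remove"
    · subst h18; decide
    by_cases h19 : h = "drop"
    · subst h19; decide
    by_cases h20 : h = "destroy"
    · subst h20; decide
    by_cases h21 : h = "purge"
    · subst h21; decide
    by_cases h22 : h = "execute"
    · subst h22; decide
    by_cases h23 : h = "run"
    · subst h23; decide
    by_cases h24 : h = "kill"
    · subst h24; decide
    by_cases h25 : h = "terminate"
    · subst h25; decide
    have f1 : ("get" == h) = false := by simp [Ne.symm h1]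
    have f2 : ("read" == h) = false := by simp [Ne.symm h2]
    have f3 : ("list" == h) = false := by simp [Ne.symm h3]
    have f4 : ("search" == h) = false := by simp [Ne.symm h4]
    have f5 : ("query" == h) = false := by simp [Ne.symm h5]
    have f6 : ("fetch" == h) = false := by simp [Ne.symm h6]
    have f7 : ("find" == h) = false := by simp [Ne.symm h7]
    have f8 : ("create" == h) = false := by simp [Ne.symm h8]
    have f9 : ("write" == h) = false := by simp [Ne.symm h9]
    have f10 : ("add" == h) = false := by simp [Ne.symm h10]
    have f11 : ("insert" == h) = false := by simp [Ne.symm h11]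
    have f12 : ("save" == h) = false := by simp [Ne.symm h12]
    have f13 : ("update" == h) = false := by simp [Ne.symm h13]
    have f14 : ("modify" == h) = false := by simp [Ne.symm h14]
    have f15 : ("set" == h) = false := by simp [Ne.symm h15]
    have f16 : ("put" == h) = false := by simp [Ne.symm h16]
    have f17 : ("delete" == h) = false := by simp [Ne.symm h17]
    have f18 : ("remove" == h) = false := by simp [Ne.symm h18]
    have f19 : ("drop" == h) = false := by simp [Ne.symm h19]
    have f20 : ("destroy" == h) = false := by simp [Ne.symm h20]
    have f21 : ("purge" == h) = false := by simp [Ne.symm h21]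
    have f22 : ("execute" == h) = false := by simp [Ne.symm h22]
    have f23 : ("run" == h) = false := by simp [Ne.symm h23]
    have f24 : ("kill" == h) = false := by simp [Ne.symm h24]
    have f25 : ("terminate" == h) = false := by simp [Ne.symm h25]
    simp [pvActionTable, PySem.Dict.get?, List.find?, h1, h2, h3, h4, h5, h6, h7, h8, h9, h10, h11, h12, h13, h14, h15, h16, h17, h18, h19, h20, h21, h22, h23, h24, h25, f1, f2, f3, f4, f5, f6, f7, f8, f9, f10, f11, f12, f13, f14, f15, f16, f17, f18, f19, f20, f21, f22, f23, f24, f25]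


theorem infer_actions_py_spec : Claim_equal_infer_actions_py := by
  intro tool_name _
  unfold Spec_infer_actions_py infer_actions_py infer_actions_py_alt
  exact infer_actions_py_core (PySem.Str.lower tool_name).toList
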